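-- pv_equiv track=rewrite | github.com/JrJessyLuo/SemiBonsai | codes/table_structurer/convert_table_structural_model.py | build_raw_to_group
-- ===== SOURCE A (Python) =====
-- from typing import Any, Dict, List, Optional, Tuple
--
-- def infer_raw_table_id(table_id: str) -> str:
--     # naming: subtab_{raw}_...
--     if table_id.startswith("subtab_"):
--         parts = table_id.split("_", 2)
--         if len(parts) >= 2:
--             return parts[1]
--     return table_id
--
-- def build_raw_to_group(all_ids: List[str], raw2subs: Dict[str, List[str]]) -> Dict[str, List[str]]:
--     """
--     Build raw_table_id -> [subtable_ids].
--     Rules: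
--       - If raw has any subtab_* children, do NOT include raw itself as a subtable.
--       - If raw has no children, treat raw itself as a single subtable.
--       - Add safety: include any subtab_* present in meta_dir even if not in mapping.
--     """
--     raw_to_group = {raw: list(subs) for raw, subs in raw2subs.items()}
--
--     # add any subtab_* not listed (safety)
--     for tid in all_ids:
--         if tid.startswith("subtab_"):
--             raw = infer_raw_table_id(tid)
--             raw_to_group.setdefault(raw, [])
--             if tid not in raw_to_group[raw]:
--                 raw_to_group[raw].append(tid)
--
--     # add single tables that have NO subtab children
--     for tid in all_ids:
--         if tid.startswith("subtab_"):
--             continue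
--         if tid not in raw_to_group or not raw_to_group[tid]:
--             raw_to_group.setdefault(tid, [])
--             if tid not in raw_to_group[tid]:
--                 raw_to_group[tid].append(tid)
--
--     # IMPORTANT: if a raw table has any subtab_* children, drop raw itself if included
--     for raw, subs in list(raw_to_group.items()):
--         has_child = any(s.startswith("subtab_") for s in subs)
--         if has_child:
--             raw_to_group[raw] = [s for s in subs if s != raw]
--
--     # dedup stable
--     for raw in raw_to_group:
--         raw_to_group[raw] = list(dict.fromkeys(raw_to_group[raw]))
--     return raw_to_group
-- ===== SOURCE B (Python) =====
-- from typing import Dict, List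
--
--
-- def infer_raw_table_id(table_id: str) -> str:
--     if table_id.startswith("subtab_"):
--         parts = table_id.split("_", 2)
--         if len(parts) >= 2:
--             return parts[1]
--     return table_id
--
--
-- def build_raw_to_group(all_ids: List[str], raw2subs: Dict[str, List[str]]) -> Dict[str, List[str]]:
--     # Dict-free per-key recomputation: no shared mutable mapping and no staged
--     # mutation passes.  The final key order is computed once; then each group
--     # is an independent pure function of (k, raw2subs, all_ids) obtained by a
--     # scan over the tagged subtab ids, and the result is assembled in one
--     # comprehension.
--     subs_in = [t for t in all_ids if t.startswith("subtab_")]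
--     plains = [t for t in all_ids if not t.startswith("subtab_")]
--     tagged = [(infer_raw_table_id(t), t) for t in subs_in]
--
--     order: List[str] = []
--     seen = set()
--     for k in list(raw2subs) + [r for r, _ in tagged] + plains:
--         if k not in seen:
--             order.append(k)
--             seen.add(k)
--
--     plain_set = set(plains)
--
--     def group(k: str) -> List[str]:
--         base = list(raw2subs.get(k, []))
--         base_set = set(base)
--         merged = base + [t for r, t in tagged if r == k and t not in base_set]
--         v: List[str] = []
--         vs = set()
--         for s in merged:
--             if s not in vs:
--                 v.append(s)
--                 vs.add(s)
--         if any(s.startswith("subtab_") for s in v):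
--             return [s for s in v if s != k]
--         if not v and k in plain_set:
--             return [k]
--         return v
--
--     return {k: group(k) for k in order}
-- ===== Notes on version B (the rewrite author's own statement) =====
-- stated objective: alternative
-- what changed: A threads one shared dict through four sequential mutation passes (copy, append subtab children, add singletons, prune raws, dedup); B keeps no shared mapping at all: it computes the final key order once, then builds every group as an independent pure function of its key by a scan over the tagged subtab ids, assembled in a single comprehension.
import Mathlib
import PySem

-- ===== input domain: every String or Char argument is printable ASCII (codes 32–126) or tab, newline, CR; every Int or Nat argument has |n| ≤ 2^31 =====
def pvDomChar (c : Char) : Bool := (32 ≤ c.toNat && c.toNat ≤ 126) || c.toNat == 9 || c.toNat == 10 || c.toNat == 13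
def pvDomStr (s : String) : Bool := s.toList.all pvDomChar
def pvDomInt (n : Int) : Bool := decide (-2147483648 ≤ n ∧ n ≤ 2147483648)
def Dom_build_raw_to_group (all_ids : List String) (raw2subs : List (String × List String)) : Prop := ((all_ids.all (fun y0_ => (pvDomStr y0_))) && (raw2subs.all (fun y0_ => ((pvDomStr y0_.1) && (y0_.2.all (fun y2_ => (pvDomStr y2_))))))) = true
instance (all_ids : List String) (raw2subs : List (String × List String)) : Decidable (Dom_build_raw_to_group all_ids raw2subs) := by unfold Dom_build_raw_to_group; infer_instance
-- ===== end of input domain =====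

-- B replaces A's four mutate-the-dict passes by a dict-free construction: key order computed once,
-- then each group built independently by nested scans; equal return value, no speed claim.


-- ===== PORT A =====
def infer_raw_table_id (table_id : String) : String :=
  if PySem.Str.startswith table_id "subtab_" then
    match PySem.Str.splitMax? table_id "_" 2 with
    | some parts => if parts.length ≥ 2 then parts.getD 1 table_id else table_id
    | none => table_id   -- unreachable: the separator "_" is non-empty
  else table_id

def build_raw_to_group (all_ids : List String) (raw2subs : List (String × List String)) : List (String × List String) :=
  -- {raw: list(subs) for raw, subs in raw2subs.items()} : a key-by-key copy of the input dict
  let d0 : PySem.Dict String (List String) := PySem.Dict.ofList raw2subs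
  -- for tid in all_ids: subtab children (setdefault, append if absent)
  let d1 := all_ids.foldl (fun d tid =>
    if PySem.Str.startswith tid "subtab_" then
      let raw := infer_raw_table_id tid
      let d' := d.setdefault raw []
      if (d'.getD raw []).contains tid then d' else d'.modify raw [] (fun l => l ++ [tid])
    else d) d0
  -- for tid in all_ids: non-subtab singletons
  let d2 := all_ids.foldl (fun d tid =>
    if PySem.Str.startswith tid "subtab_" then d
    else if !(d.contains tid) || (d.getD tid []).isEmpty then
      let d' := d.setdefault tid []
      if (d'.getD tid []).contains tid then d' else d'.modify tid [] (fun l => l ++ [tid])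
    else d) d1
  -- for raw, subs in list(raw_to_group.items()): drop raw itself when it has a subtab child
  let d3 := d2.items.foldl (fun d p =>
    if p.2.any (fun s => PySem.Str.startswith s "subtab_") then
      d.insert p.1 (p.2.filter (fun s => s ≠ p.1))
    else d) d2
  -- for raw in raw_to_group: stable dedup
  let d4 := d3.keys.foldl (fun d k => d.insert k (PySem.List.dedup (d.getD k []))) d3
  d4.items

-- ===== PORT B =====
def build_raw_to_group_alt (all_ids : List String) (raw2subs : List (String × List String)) : List (String × List String) :=
  let subs_in := all_ids.filter (fun t => PySem.Str.startswith t "subtab_")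
  let plains := all_ids.filter (fun t => !PySem.Str.startswith t "subtab_")
  let tagged := subs_in.map (fun t => (infer_raw_table_id t, t))
  let rd : PySem.Dict String (List String) := PySem.Dict.ofList raw2subs
  -- for k in list(raw2subs) + [r for r,_ in tagged] + plains: if k not in seen: order.append(k); seen.add(k)
  let order := ((rd.keys ++ tagged.map Prod.fst ++ plains).foldl
    (fun st k => if PySem.Set.contains st.2 k then st else (st.1 ++ [k], PySem.Set.add st.2 k))
    (([] : List String), PySem.Set.empty)).1
  let plain_set := PySem.Set.ofList plains
  -- {k: group(k) for k in order}: each group an independent pure function of its key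
  order.map (fun k =>
    let base := rd.getD k []
    let base_set := PySem.Set.ofList base
    let merged := base ++
      (tagged.filter (fun p => p.1 == k && !(PySem.Set.contains base_set p.2))).map Prod.snd
    -- for s in merged: if s not in vs: v.append(s); vs.add(s)
    let v := (merged.foldl
      (fun st s => if PySem.Set.contains st.2 s then st else (st.1 ++ [s], PySem.Set.add st.2 s))
      (([] : List String), PySem.Set.empty)).1
    let v' := if v.any (fun s => PySem.Str.startswith s "subtab_") then v.filter (fun s => s ≠ k)
              else if v.isEmpty && PySem.Set.contains plain_set k then [k] else v
    (k, v'))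

-- ===== PRECONDITION & SPEC =====
def Spec_build_raw_to_group (all_ids : List String) (raw2subs : List (String × List String)) (out : List (String × List String)) : Prop := out = build_raw_to_group_alt all_ids raw2subs
instance (all_ids : List String) (raw2subs : List (String × List String)) (out : List (String × List String)) : Decidable (Spec_build_raw_to_group all_ids raw2subs out) := by unfold Spec_build_raw_to_group; infer_instance

-- ===== CLAIM (what is proved, stated in full; the proofs are below) =====
def Claim_equal_build_raw_to_group : Prop := ∀ (all_ids : List String) (raw2subs : List (String × List String)), Dom_build_raw_to_group all_ids raw2subs → Spec_build_raw_to_group all_ids raw2subs (build_raw_to_group all_ids raw2subs)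

-- ===== LEMMAS AND PROOFS =====

-- proof-side abbreviations for the loop bodies of A
def isSub (t : String) : Bool := PySem.Str.startswith t "subtab_"

def body2 (d : PySem.Dict String (List String)) (tid : String) : PySem.Dict String (List String) :=
  let raw := infer_raw_table_id tid
  let d' := d.setdefault raw []
  if (d'.getD raw []).contains tid then d' else d'.modify raw [] (fun l => l ++ [tid])

def body3 (d : PySem.Dict String (List String)) (tid : String) : PySem.Dict String (List String) :=
  if !(d.contains tid) || (d.getD tid []).isEmpty then
    let d' := d.setdefault tid []
    if (d'.getD tid []).contains tid then d' else d'.modify tid [] (fun l => l ++ [tid])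
  else d

def body4 (d : PySem.Dict String (List String)) (p : String × List String) : PySem.Dict String (List String) :=
  if p.2.any (fun s => PySem.Str.startswith s "subtab_") then
    d.insert p.1 (p.2.filter (fun s => s ≠ p.1))
  else d

def body5 (d : PySem.Dict String (List String)) (k : String) : PySem.Dict String (List String) :=
  d.insert k (PySem.List.dedup (d.getD k []))

-- the list of children A's second loop appends for key k, given the list already present
def kidsAux (k : String) : List String → List String → List String
  | [], _ => []
  | t :: ts, cur =>
    if infer_raw_table_id t == k && !(cur.contains t) then t :: kidsAux k ts (cur ++ [t])
    else kidsAux k ts cur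

lemma foldl_body3_flip (l : List String) (d : PySem.Dict String (List String)) :
    l.foldl (fun d tid => if isSub tid then d else body3 d tid) d
      = l.foldl (fun d tid => if !isSub tid then body3 d tid else d) d := by
  have h : (fun (d : PySem.Dict String (List String)) tid => if isSub tid then d else body3 d tid)
      = (fun d tid => if !isSub tid then body3 d tid else d) := by
    funext d tid; cases _h : isSub tid <;> simp
  
  rw [h]

-- ---- generic Set facts used below ----
lemma ofList_filter {α : Type} [BEq α] [LawfulBEq α] (q : α → Bool) (l : List α) :
    PySem.Set.ofList (l.filter q) = (PySem.Set.ofList l).filter q := by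
  induction l with
  | nil => simp
  | cons x xs ih =>
    by_cases hq : q x = true
    · rw [List.filter_cons_of_pos hq, PySem.Set.ofList_cons, PySem.Set.ofList_cons,
        List.filter_cons_of_pos hq, ih]
      unfold PySem.Set.discard
      rw [List.filter_comm]
    · rw [List.filter_cons_of_neg (by simp [hq]), ih, PySem.Set.ofList_cons,
        List.filter_cons_of_neg (by simp [hq])]
      unfold PySem.Set.discard
      rw [List.filter_comm]
      refine (List.filter_eq_self.mpr ?_).symm
      intro a ha
      simp only [Bool.not_eq_eq_eq_not, Bool.not_true, beq_eq_false_iff_ne, ne_eq]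
      rintro rfl
      exact hq (List.of_mem_filter ha)

lemma ofList_eq_nil_iff {α : Type} [BEq α] [LawfulBEq α] (l : List α) :
    PySem.Set.ofList l = [] ↔ l = [] := by
  cases l with
  | nil => simp
  | cons x xs => rw [PySem.Set.ofList_cons]; simp

lemma any_ofList {α : Type} [BEq α] [LawfulBEq α] (p : α → Bool) (l : List α) :
    (PySem.Set.ofList l).any p = l.any p := by
  rcases h : l.any p with _ | _
  · have := List.any_eq_false.mp h
    exact List.any_eq_false.mpr (fun a ha => this a ((PySem.Set.mem_ofList l a).mp ha))
  · obtain ⟨a, ha, hpa⟩ := List.any_eq_true.mp h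
    exact List.any_eq_true.mpr ⟨a, (PySem.Set.mem_ofList l a).mpr ha, hpa⟩

lemma ofList_append_disjoint {α : Type} [BEq α] [LawfulBEq α] (xs ys : List α)
    (hnd : ys.Nodup) (hdisj : ∀ y ∈ ys, y ∉ xs) :
    PySem.Set.ofList (xs ++ ys) = PySem.Set.ofList xs ++ ys := by
  rw [PySem.Set.ofList_append]
  exact PySem.Set.update_eq_append_of_disjoint _ _ hnd
    (fun y hy => fun hmem => hdisj y hy ((PySem.Set.mem_ofList xs y).mp hmem))

-- ---- kidsAux in closed form ----
lemma contains_true {α : Type} [BEq α] [LawfulBEq α] {l : List α} {a : α} (h : a ∈ l) :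
    l.contains a = true := List.contains_iff_mem.mpr h

lemma contains_false {α : Type} [BEq α] [LawfulBEq α] {l : List α} {a : α} (h : a ∉ l) :
    l.contains a = false := by
  rcases hc : l.contains a with _ | _
  · rfl
  · exact absurd (List.contains_iff_mem.mp hc) h

lemma kidsAux_eq_aux (k : String) (ts : List String) : ∀ (base acc : List String),
    kidsAux k ts (base ++ acc)
      = (PySem.Set.ofList (ts.filter (fun t => infer_raw_table_id t == k && !(base.contains t)))).filter
          (fun t => !(acc.contains t)) := by
  induction ts with
  | nil => intro base acc; simp [kidsAux]
  | cons t ts ih =>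
    intro base acc
    simp only [kidsAux, List.filter_cons]
    by_cases hk : (infer_raw_table_id t == k) = true
    · by_cases hb : t ∈ base
      · rw [contains_true (by simp [hb] : t ∈ base ++ acc), contains_true hb]
        simp only [Bool.not_true, Bool.and_false]
        exact ih base acc
      · by_cases hacc : t ∈ acc
        · rw [contains_true (by simp [hacc] : t ∈ base ++ acc), contains_false hb]
          simp only [hk, Bool.not_true, Bool.not_false, Bool.and_false, Bool.and_true, if_true]
          rw [PySem.Set.ofList_cons, List.filter_cons, contains_true hacc]
          simp only [Bool.not_true]
          unfold PySem.Set.discard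
          rw [List.filter_filter, ih base acc]
          apply List.filter_congr
          intro y _
          by_cases hy : y ∈ acc
          · rw [contains_true hy]
            simp
          · rw [contains_false hy]
            have hyt : (y == t) = false := by
              simp only [beq_eq_false_iff_ne, ne_eq]
              rintro rfl; exact hy hacc
            rw [hyt]
            simp
        · rw [contains_false (by
              intro hm
              rcases List.mem_append.mp hm with h' | h'
              · exact hb h'
              · exact hacc h'), contains_false hb]
          simp only [hk, Bool.not_false, Bool.and_true, if_true]
          rw [PySem.Set.ofList_cons, List.filter_cons, contains_false hacc]
          simp only [Bool.not_false, if_true]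
          rw [List.append_assoc base acc [t], ih base (acc ++ [t])]
          unfold PySem.Set.discard
          rw [List.filter_filter]
          congr 1
          apply List.filter_congr
          intro y _
          by_cases hyt : y = t
          · subst hyt
            rw [contains_true (by simp : y ∈ acc ++ [y])]
            simp
          · have h1 : (y == t) = false := by simp [hyt]
            by_cases hy : y ∈ acc
            · rw [contains_true hy, contains_true (by simp [hy] : y ∈ acc ++ [t])]
              simp
            · rw [contains_false hy, contains_false (by
                intro hm
                rcases List.mem_append.mp hm with h' | h'
                · exact hy h'
                · exact hyt (List.mem_singleton.mp h')), h1]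
              simp
    · have hk' : (infer_raw_table_id t == k) = false := by
        rcases h : (infer_raw_table_id t == k) with _ | _
        · rfl
        · exact absurd h hk
      rw [hk']
      simp only [Bool.false_and]
      exact ih base acc

lemma kidsAux_eq (k : String) (ts base : List String) :
    kidsAux k ts base
      = PySem.Set.ofList (ts.filter (fun t => infer_raw_table_id t == k && !(base.contains t))) := by
  have h := kidsAux_eq_aux k ts base []
  simp only [List.append_nil] at h
  rw [h]
  exact List.filter_eq_self.mpr (fun a _ => by simp)

-- ---- step 2 ----
lemma body2_eq (d : PySem.Dict String (List String)) (t : String) :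
    body2 d t = if ((d.setdefault (infer_raw_table_id t) []).getD (infer_raw_table_id t) []).contains t
      then d.setdefault (infer_raw_table_id t) []
      else (d.setdefault (infer_raw_table_id t) []).modify (infer_raw_table_id t) [] (fun l => l ++ [t]) := rfl

lemma getD_foldl_body2 (ts : List String) (d : PySem.Dict String (List String)) (k : String) :
    (ts.foldl body2 d).getD k [] = d.getD k [] ++ kidsAux k ts (d.getD k []) := by
  induction ts generalizing d with
  | nil => simp [kidsAux]
  | cons t ts ih =>
    simp only [List.foldl_cons, kidsAux]
    have hsd : (d.setdefault (infer_raw_table_id t) []).getD (infer_raw_table_id t) [] =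
        d.getD (infer_raw_table_id t) [] :=
      PySem.Dict.getD_setdefault_self d (infer_raw_table_id t) [] []
    rw [body2_eq, hsd, ih]
    by_cases hk : k = infer_raw_table_id t
    · have hbeq : (infer_raw_table_id t == k) = true := by simp [hk]
      rw [hbeq, hk]
      by_cases hc : ((d.getD (infer_raw_table_id t) []).contains t) = true
      · rw [if_pos hc, hc, hsd]
        simp
      · have hc' := eq_false_of_ne_true hc
        rw [if_neg hc, hc']
        simp only [Bool.not_false, Bool.and_true, if_true]
        rw [PySem.Dict.getD_modify_self, hsd, List.append_assoc]
        rfl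
    · have hne : (infer_raw_table_id t == k) = false := by
        simp only [beq_eq_false_iff_ne, ne_eq]
        exact fun h => hk h.symm
      rw [hne]
      simp only [Bool.false_and, Bool.false_eq_true, if_false]
      have hgd : (if ((d.getD (infer_raw_table_id t) []).contains t)
          then d.setdefault (infer_raw_table_id t) []
          else (d.setdefault (infer_raw_table_id t) []).modify (infer_raw_table_id t) [] (fun l => l ++ [t])).getD k []
          = d.getD k [] := by
        by_cases hc : ((d.getD (infer_raw_table_id t) []).contains t) = true
        · rw [if_pos hc, PySem.Dict.getD_eq_get?_getD,
            PySem.Dict.get?_setdefault_of_ne _ _ hk, ← PySem.Dict.getD_eq_get?_getD]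
        · rw [if_neg hc, PySem.Dict.getD_modify]
          rw [if_neg hk, PySem.Dict.getD_eq_get?_getD,
            PySem.Dict.get?_setdefault_of_ne _ _ hk, ← PySem.Dict.getD_eq_get?_getD]
      rw [hgd]

lemma keys_body2 (d : PySem.Dict String (List String)) (t : String) :
    (body2 d t).keys = PySem.Set.add d.keys (infer_raw_table_id t) := by
  rw [body2_eq, PySem.Set.add_eq_ite]
  have hkeys : (d.setdefault (infer_raw_table_id t) []).keys =
      if infer_raw_table_id t ∈ d.keys then d.keys else d.keys ++ [infer_raw_table_id t] := by
    rw [PySem.Dict.keys_setdefault]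
    by_cases hm : d.contains (infer_raw_table_id t) = true
    · rw [if_pos hm, if_pos (PySem.Dict.contains_iff_mem_keys d _ |>.mp hm)]
    · rw [if_neg hm, if_neg (fun h => hm (PySem.Dict.contains_iff_mem_keys d _ |>.mpr h))]
  by_cases hc : (((d.setdefault (infer_raw_table_id t) []).getD (infer_raw_table_id t) []).contains t) = true
  · rw [if_pos hc, hkeys]
  · rw [if_neg hc, PySem.Dict.keys_modify,
      PySem.Dict.keys_insert_of_contains _ _ (by
        rw [PySem.Dict.contains_setdefault]; simp), hkeys]

lemma keys_foldl_body2 (ts : List String) (d : PySem.Dict String (List String)) :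
    (ts.foldl body2 d).keys = PySem.Set.update d.keys (ts.map infer_raw_table_id) := by
  induction ts generalizing d with
  | nil => simp [PySem.Set.update]
  | cons t ts ih =>
    simp only [List.foldl_cons, List.map_cons, PySem.Set.update_cons]
    rw [ih, keys_body2]

-- ---- step 3 ----
lemma body3_eq (d : PySem.Dict String (List String)) (t : String) :
    body3 d t = if !(d.contains t) || (d.getD t []).isEmpty then
      (if ((d.setdefault t []).getD t []).contains t
        then d.setdefault t []
        else (d.setdefault t []).modify t [] (fun l => l ++ [t]))
    else d := rfl

lemma body3_cond (d : PySem.Dict String (List String)) (t : String) :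
    (!(d.contains t) || (d.getD t []).isEmpty) = (d.getD t [] == []) := by
  by_cases hc : d.contains t = true
  · rw [hc]
    simp
  · have hc' := eq_false_of_ne_true hc
    rw [hc', PySem.Dict.getD_of_not_contains _ _ hc']
    simp

lemma getD_body3_fire (d : PySem.Dict String (List String)) (t : String)
    (h : d.getD t [] = []) : (body3 d t).getD t [] = [t] := by
  rw [body3_eq, if_pos (by rw [body3_cond]; simp [h])]
  have hsd : (d.setdefault t []).getD t [] = d.getD t [] :=
    PySem.Dict.getD_setdefault_self d t [] []
  rw [hsd, h]
  simp only [List.contains_nil, Bool.false_eq_true, if_false]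
  rw [PySem.Dict.getD_modify_self, hsd, h]
  rfl

lemma getD_body3_of_ne (d : PySem.Dict String (List String)) (t k : String)
    (hk : k ≠ t) : (body3 d t).getD k [] = d.getD k [] := by
  rw [body3_eq]
  by_cases hf : (!(d.contains t) || (d.getD t []).isEmpty) = true
  · rw [if_pos hf]
    by_cases hc : (((d.setdefault t []).getD t []).contains t) = true
    · rw [if_pos hc, PySem.Dict.getD_eq_get?_getD,
        PySem.Dict.get?_setdefault_of_ne _ _ hk, ← PySem.Dict.getD_eq_get?_getD]
    · rw [if_neg hc, PySem.Dict.getD_modify, if_neg hk, PySem.Dict.getD_eq_get?_getD,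
        PySem.Dict.get?_setdefault_of_ne _ _ hk, ← PySem.Dict.getD_eq_get?_getD]
  · rw [if_neg hf]

lemma getD_foldl_body3 (ts : List String) (d : PySem.Dict String (List String)) (k : String) :
    (ts.foldl body3 d).getD k [] =
      if k ∈ ts ∧ d.getD k [] = [] then [k] else d.getD k [] := by
  induction ts generalizing d with
  | nil => simp
  | cons t ts ih =>
    simp only [List.foldl_cons]
    rw [ih]
    by_cases hk : k = t
    · subst hk
      by_cases he : d.getD k [] = []
      · rw [getD_body3_fire d k he]
        simp [he]
      · have hnf : (body3 d k).getD k [] = d.getD k [] := by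
          rw [body3_eq, if_neg (by rw [body3_cond]; simp [he])]
        rw [hnf]
        simp [he]
    · rw [getD_body3_of_ne d t k hk]
      by_cases hm : k ∈ ts
      · simp [hm, hk]
      · have : k ∉ t :: ts := by
          intro h
          rcases List.mem_cons.mp h with h' | h'
          · exact hk h'
          · exact hm h'
        simp [hm, this]

lemma keys_body3 (d : PySem.Dict String (List String)) (t : String) :
    (body3 d t).keys = PySem.Set.add d.keys t := by
  rw [body3_eq, PySem.Set.add_eq_ite]
  have hkeys : (d.setdefault t []).keys =
      if t ∈ d.keys then d.keys else d.keys ++ [t] := by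
    rw [PySem.Dict.keys_setdefault]
    by_cases hm : d.contains t = true
    · rw [if_pos hm, if_pos (PySem.Dict.contains_iff_mem_keys d _ |>.mp hm)]
    · rw [if_neg hm, if_neg (fun h => hm (PySem.Dict.contains_iff_mem_keys d _ |>.mpr h))]
  by_cases hf : (!(d.contains t) || (d.getD t []).isEmpty) = true
  · rw [if_pos hf]
    by_cases hc : (((d.setdefault t []).getD t []).contains t) = true
    · rw [if_pos hc, hkeys]
    · rw [if_neg hc, PySem.Dict.keys_modify,
        PySem.Dict.keys_insert_of_contains _ _ (by
          rw [PySem.Dict.contains_setdefault]; simp), hkeys]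
  · rw [if_neg hf]
    have hcont : d.contains t = true := by
      rcases h : d.contains t with _ | _
      · rw [h] at hf; simp at hf
      · rfl
    rw [if_pos (PySem.Dict.contains_iff_mem_keys d _ |>.mp hcont)]

lemma keys_foldl_body3 (ts : List String) (d : PySem.Dict String (List String)) :
    (ts.foldl body3 d).keys = PySem.Set.update d.keys ts := by
  induction ts generalizing d with
  | nil => simp [PySem.Set.update]
  | cons t ts ih =>
    simp only [List.foldl_cons, PySem.Set.update_cons]
    rw [ih, keys_body3]

-- ---- step 4 ----
lemma getD_body4_of_ne (d : PySem.Dict String (List String)) (p : String × List String)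
    (k : String) (hk : k ≠ p.1) : (body4 d p).getD k [] = d.getD k [] := by
  unfold body4
  by_cases hc : (p.2.any (fun s => PySem.Str.startswith s "subtab_")) = true
  · rw [if_pos hc, PySem.Dict.getD_insert, if_neg hk]
  · rw [if_neg hc]

lemma getD_foldl_body4_notmem (l : List (String × List String)) (d : PySem.Dict String (List String))
    (k : String) (hk : k ∉ l.map Prod.fst) :
    (l.foldl body4 d).getD k [] = d.getD k [] := by
  induction l generalizing d with
  | nil => rfl
  | cons p l ih =>
    simp only [List.map_cons, List.mem_cons, not_or] at hk
    simp only [List.foldl_cons]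
    rw [ih _ hk.2, getD_body4_of_ne d p k hk.1]

lemma getD_foldl_body4_mem (l : List (String × List String)) (d : PySem.Dict String (List String))
    (k : String) (v : List String) (hnd : (l.map Prod.fst).Nodup) (hm : (k, v) ∈ l)
    (hval : ∀ p ∈ l, d.getD p.1 [] = p.2) :
    (l.foldl body4 d).getD k [] =
      if v.any (fun s => PySem.Str.startswith s "subtab_") then v.filter (fun s => s ≠ k) else v := by
  induction l generalizing d with
  | nil => exact absurd hm (List.not_mem_nil)
  | cons p l ih =>
    simp only [List.map_cons, List.nodup_cons] at hnd
    simp only [List.foldl_cons]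
    rcases List.mem_cons.mp hm with hh | ht
    · have hk : k = p.1 := by rw [← hh]
      have hv : v = p.2 := by rw [← hh]
      subst hk; subst hv
      have hnot : p.1 ∉ l.map Prod.fst := hnd.1
      rw [getD_foldl_body4_notmem l _ p.1 hnot]
      unfold body4
      by_cases hc : (p.2.any (fun s => PySem.Str.startswith s "subtab_")) = true
      · rw [if_pos hc, if_pos hc, PySem.Dict.getD_insert, if_pos rfl]
      · rw [if_neg hc, if_neg hc]
        exact hval p (List.mem_cons_self)
    · have hkp : k ≠ p.1 := by
        intro h
        exact hnd.1 (h ▸ (List.mem_map_of_mem (f := Prod.fst) ht))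
      refine ih _ hnd.2 ht ?_
      intro q hq
      have hqp : q.1 ≠ p.1 := by
        intro h
        exact hnd.1 (h ▸ (List.mem_map_of_mem (f := Prod.fst) hq))
      rw [getD_body4_of_ne d p q.1 hqp]
      exact hval q (List.mem_cons_of_mem _ hq)

lemma keys_foldl_body4 (l : List (String × List String)) (d : PySem.Dict String (List String))
    (hall : ∀ p ∈ l, d.contains p.1 = true) :
    (l.foldl body4 d).keys = d.keys := by
  induction l generalizing d with
  | nil => rfl
  | cons p l ih =>
    simp only [List.foldl_cons]
    have hkeys : (body4 d p).keys = d.keys := by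
      unfold body4
      by_cases hc : (p.2.any (fun s => PySem.Str.startswith s "subtab_")) = true
      · rw [if_pos hc, PySem.Dict.keys_insert_of_contains _ _ (hall p List.mem_cons_self)]
      · rw [if_neg hc]
    rw [ih _ (fun q hq => by
      unfold body4
      by_cases hc : (p.2.any (fun s => PySem.Str.startswith s "subtab_")) = true
      · rw [if_pos hc, PySem.Dict.contains_insert]
        rw [hall q (List.mem_cons_of_mem _ hq)]
        simp
      · rw [if_neg hc]
        exact hall q (List.mem_cons_of_mem _ hq)), hkeys]

lemma getD_foldl_body5_notmem (l : List String) (d : PySem.Dict String (List String))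
    (k : String) (hk : k ∉ l) :
    (l.foldl body5 d).getD k [] = d.getD k [] := by
  induction l generalizing d with
  | nil => rfl
  | cons t l ih =>
    simp only [List.mem_cons, not_or] at hk
    simp only [List.foldl_cons]
    rw [ih _ hk.2]
    unfold body5
    rw [PySem.Dict.getD_insert, if_neg hk.1]

lemma getD_foldl_body5 (l : List String) (d : PySem.Dict String (List String)) (k : String)
    (hnd : l.Nodup) :
    (l.foldl body5 d).getD k [] =
      if k ∈ l then PySem.List.dedup (d.getD k []) else d.getD k [] := by
  induction l generalizing d with
  | nil => simp
  | cons t l ih =>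
    simp only [List.nodup_cons] at hnd
    simp only [List.foldl_cons]
    by_cases hk : k = t
    · subst hk
      rw [getD_foldl_body5_notmem l _ k hnd.1]
      unfold body5
      rw [PySem.Dict.getD_insert, if_pos rfl, if_pos (List.mem_cons_self)]
    · rw [ih _ hnd.2]
      have hgd : (body5 d t).getD k [] = d.getD k [] := by
        unfold body5
        rw [PySem.Dict.getD_insert, if_neg hk]
      rw [hgd]
      by_cases hm : k ∈ l
      · rw [if_pos hm, if_pos (List.mem_cons_of_mem _ hm)]
      · rw [if_neg hm, if_neg (by
          intro h
          rcases List.mem_cons.mp h with h' | h'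
          · exact hk h'
          · exact hm h')]

lemma keys_foldl_body5 (l : List String) (d : PySem.Dict String (List String))
    (hall : ∀ x ∈ l, d.contains x = true) :
    (l.foldl body5 d).keys = d.keys := by
  induction l generalizing d with
  | nil => rfl
  | cons t l ih =>
    simp only [List.foldl_cons]
    have hkeys : (body5 d t).keys = d.keys :=
      PySem.Dict.keys_insert_of_contains _ _ (hall t List.mem_cons_self)
    rw [ih _ (fun x hx => by
      unfold body5
      rw [PySem.Dict.contains_insert, hall x (List.mem_cons_of_mem _ hx)]
      simp), hkeys]

-- proof-side names for B's pipeline and A's pipeline after filtering the two loops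
def rdOf (raw2subs : List (String × List String)) : PySem.Dict String (List String) :=
  PySem.Dict.ofList raw2subs

def subtabsOf (all_ids : List String) : List String :=
  all_ids.filter (fun t => PySem.Str.startswith t "subtab_")

def singlesOf (all_ids : List String) : List String :=
  all_ids.filter (fun t => !PySem.Str.startswith t "subtab_")

def taggedOf (all_ids : List String) : List (String × String) :=
  (subtabsOf all_ids).map (fun t => (infer_raw_table_id t, t))

def dedupPair (l : List String) : List String :=
  (l.foldl (fun st k => if PySem.Set.contains st.2 k then st else (st.1 ++ [k], PySem.Set.add st.2 k))
    (([] : List String), PySem.Set.empty)).1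

def keyorderOf (all_ids : List String) (raw2subs : List (String × List String)) : List String :=
  dedupPair ((rdOf raw2subs).keys ++ (taggedOf all_ids).map Prod.fst ++ singlesOf all_ids)

def valB (all_ids : List String) (raw2subs : List (String × List String)) (k : String) : List String :=
  let base := (rdOf raw2subs).getD k []
  let base_set := PySem.Set.ofList base
  let merged := base ++
    ((taggedOf all_ids).filter (fun p => p.1 == k && !(PySem.Set.contains base_set p.2))).map Prod.snd
  let v := dedupPair merged
  if v.any (fun s => PySem.Str.startswith s "subtab_") then v.filter (fun s => s ≠ k)
  else if v.isEmpty && PySem.Set.contains (PySem.Set.ofList (singlesOf all_ids)) k then [k] else v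

lemma contains_congr {α : Type} [BEq α] [LawfulBEq α] {l₁ l₂ : List α} {a : α}
    (h : a ∈ l₁ ↔ a ∈ l₂) : l₁.contains a = l₂.contains a := by
  by_cases hm : a ∈ l₁
  · rw [contains_true hm, contains_true (h.mp hm)]
  · rw [contains_false hm, contains_false (fun h2 => hm (h.mpr h2))]

-- the "if not in seen then append to both" pair fold keeps the first occurrences: it IS Set.update
lemma foldl_pair_update (l : List String) : ∀ (o : List String) (s : PySem.Set String),
    (∀ x : String, PySem.Set.contains s x = o.contains x) →
    (l.foldl (fun st k => if PySem.Set.contains st.2 k then st else (st.1 ++ [k], PySem.Set.add st.2 k))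
      (o, s)).1 = PySem.Set.update o l := by
  induction l with
  | nil => intro o s _; simp [PySem.Set.update]
  | cons k l ih =>
    intro o s hs
    simp only [List.foldl_cons, PySem.Set.update_cons]
    by_cases hc : PySem.Set.contains s k = true
    · rw [if_pos hc]
      have hmem : k ∈ o := List.contains_iff_mem.mp (by rw [← hs k]; exact hc)
      rw [PySem.Set.add_of_mem hmem]
      exact ih o s hs
    · rw [if_neg hc]
      have hmem : k ∉ o := by
        intro hm
        exact hc (by rw [hs k]; exact contains_true hm)
      rw [PySem.Set.add_of_not_mem hmem]
      refine ih (o ++ [k]) (PySem.Set.add s k) ?_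
      intro x
      rw [PySem.Set.contains_eq_listContains]
      refine contains_congr ?_
      rw [PySem.Set.mem_add, List.mem_append, List.mem_singleton]
      constructor
      · rintro (hx | hx)
        · exact Or.inl (List.contains_iff_mem.mp (by
            rw [← hs x, PySem.Set.contains_eq_listContains]; exact contains_true hx))
        · exact Or.inr hx
      · rintro (hx | hx)
        · exact Or.inl (by
            have : PySem.Set.contains s x = true := by rw [hs x]; exact contains_true hx
            rw [PySem.Set.contains_eq_listContains] at this
            exact List.contains_iff_mem.mp this)
        · exact Or.inr hx

lemma dedupPair_eq (l : List String) : dedupPair l = PySem.Set.ofList l := by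
  unfold dedupPair
  rw [foldl_pair_update l [] PySem.Set.empty (fun x => rfl), PySem.Set.update_nil_left]

lemma keyorder_eq (all_ids : List String) (raw2subs : List (String × List String)) :
    keyorderOf all_ids raw2subs
      = PySem.Set.ofList ((rdOf raw2subs).keys ++ (subtabsOf all_ids).map infer_raw_table_id
          ++ singlesOf all_ids) := by
  unfold keyorderOf taggedOf
  rw [dedupPair_eq, List.map_map]
  rfl

lemma buildB_eq (all_ids : List String) (raw2subs : List (String × List String)) :
    build_raw_to_group_alt all_ids raw2subs
      = (keyorderOf all_ids raw2subs).map (fun k => (k, valB all_ids raw2subs k)) := rfl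

def dict1 (all_ids : List String) (raw2subs : List (String × List String)) : PySem.Dict String (List String) :=
  (subtabsOf all_ids).foldl body2 (rdOf raw2subs)

def dict2 (all_ids : List String) (raw2subs : List (String × List String)) : PySem.Dict String (List String) :=
  (singlesOf all_ids).foldl body3 (dict1 all_ids raw2subs)

def dict3 (all_ids : List String) (raw2subs : List (String × List String)) : PySem.Dict String (List String) :=
  (dict2 all_ids raw2subs).items.foldl body4 (dict2 all_ids raw2subs)

lemma foldl2_eq (all_ids : List String) (raw2subs : List (String × List String)) :
    all_ids.foldl (fun d tid => if isSub tid then body2 d tid else d) (PySem.Dict.ofList raw2subs)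
      = dict1 all_ids raw2subs := by
  unfold dict1 subtabsOf rdOf isSub
  rw [List.foldl_filter]

lemma foldl3_eq (all_ids : List String) (raw2subs : List (String × List String)) :
    all_ids.foldl (fun d tid => if isSub tid then d else body3 d tid)
        (dict1 all_ids raw2subs)
      = dict2 all_ids raw2subs := by
  unfold dict2 singlesOf
  rw [foldl_body3_flip, List.foldl_filter]
  rfl

lemma buildA_pipeline (all_ids : List String) (raw2subs : List (String × List String)) :
    build_raw_to_group all_ids raw2subs
      = ((dict3 all_ids raw2subs).keys.foldl body5 (dict3 all_ids raw2subs)).items := by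
  unfold dict3
  rw [← foldl3_eq, ← foldl2_eq]
  rfl

lemma getD_dict2 (all_ids : List String) (raw2subs : List (String × List String)) (k : String) :
    (dict2 all_ids raw2subs).getD k []
      = (if k ∈ singlesOf all_ids ∧
            ((rdOf raw2subs).getD k [] ++
              PySem.List.dedup ((subtabsOf all_ids).filter
                (fun t => infer_raw_table_id t == k && !(((rdOf raw2subs).getD k []).contains t)))) = []
          then [k]
          else (rdOf raw2subs).getD k [] ++
            PySem.List.dedup ((subtabsOf all_ids).filter
              (fun t => infer_raw_table_id t == k && !(((rdOf raw2subs).getD k []).contains t)))) := by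
  unfold dict2 dict1
  rw [getD_foldl_body3, getD_foldl_body2, kidsAux_eq]
  rfl

lemma keys_dict2 (all_ids : List String) (raw2subs : List (String × List String)) :
    (dict2 all_ids raw2subs).keys = keyorderOf all_ids raw2subs := by
  unfold dict2 dict1
  rw [keys_foldl_body3, keys_foldl_body2, keyorder_eq]
  show PySem.Set.update (PySem.Set.update (rdOf raw2subs).keys ((subtabsOf all_ids).map infer_raw_table_id)) (singlesOf all_ids)
    = PySem.Set.ofList ((rdOf raw2subs).keys ++ (subtabsOf all_ids).map infer_raw_table_id ++ singlesOf all_ids)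
  rw [PySem.Set.ofList_append, PySem.Set.ofList_append,
    PySem.Set.ofList_eq_self_of_nodup ((rdOf raw2subs).keys) (PySem.Dict.nodup_keys_ofList raw2subs)]

lemma nodup_keys_dict2 (all_ids : List String) (raw2subs : List (String × List String)) :
    (dict2 all_ids raw2subs).keys.Nodup := by
  unfold dict2 dict1
  rw [keys_foldl_body3, keys_foldl_body2]
  exact PySem.Set.nodup_update _ _ (PySem.Set.nodup_update _ _ (PySem.Dict.nodup_keys_ofList raw2subs))

lemma getD_dict3 (all_ids : List String) (raw2subs : List (String × List String)) (k : String)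
    (hk : k ∈ (dict2 all_ids raw2subs).keys) :
    (dict3 all_ids raw2subs).getD k []
      = (if ((dict2 all_ids raw2subs).getD k []).any (fun s => PySem.Str.startswith s "subtab_")
          then ((dict2 all_ids raw2subs).getD k []).filter (fun s => s ≠ k)
          else (dict2 all_ids raw2subs).getD k []) := by
  have hnd : (dict2 all_ids raw2subs).keys.Nodup := nodup_keys_dict2 all_ids raw2subs
  have hndl : ((dict2 all_ids raw2subs).items.map Prod.fst).Nodup := hnd
  refine getD_foldl_body4_mem _ _ _ _ hndl ?_ ?_
  · rw [PySem.Dict.items_eq_map_keys _ hnd []]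
    exact List.mem_map_of_mem hk
  · intro p hp
    exact PySem.Dict.getD_of_mem_items _ hp hnd []

lemma keys_dict3 (all_ids : List String) (raw2subs : List (String × List String)) :
    (dict3 all_ids raw2subs).keys = (dict2 all_ids raw2subs).keys := by
  unfold dict3
  exact keys_foldl_body4 _ _ (fun p hp =>
    (PySem.Dict.contains_iff_mem_keys _ _).mpr (PySem.Dict.mem_keys_of_mem_items _ hp))

lemma final_value (all_ids : List String) (raw2subs : List (String × List String)) (k : String)
    (hk : k ∈ (dict2 all_ids raw2subs).keys) :
    PySem.List.dedup ((dict3 all_ids raw2subs).getD k []) = valB all_ids raw2subs k := by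
  rw [getD_dict3 all_ids raw2subs k hk, getD_dict2]
  simp only [valB, dedupPair_eq]
  simp only [PySem.List.dedup]
  -- B's tagged filter-then-project is the plain filter of the subtab ids
  rw [show ((taggedOf all_ids).filter
        (fun p => p.1 == k && !(PySem.Set.contains (PySem.Set.ofList ((rdOf raw2subs).getD k [])) p.2))).map Prod.snd
      = (subtabsOf all_ids).filter
        (fun t => infer_raw_table_id t == k && !(((rdOf raw2subs).getD k []).contains t)) by
    unfold taggedOf
    rw [List.filter_map, List.map_map]
    have hmap : ((fun (p : String × String) => p.2) ∘ fun t => (infer_raw_table_id t, t))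
        = (id : String → String) := rfl
    rw [hmap, List.map_id]
    apply List.filter_congr
    intro t _
    simp only [Function.comp]
    congr 1
    congr 1
    rw [PySem.Set.contains_eq_listContains]
    exact contains_congr (PySem.Set.mem_ofList _ t)]
  set base := (rdOf raw2subs).getD k [] with hbase
  set rawkids := (subtabsOf all_ids).filter
    (fun t => infer_raw_table_id t == k && !(base.contains t)) with hrawkids
  set kids := PySem.Set.ofList rawkids with hkids
  have hknd : kids.Nodup := PySem.Set.nodup_ofList _
  have hdisj : ∀ t ∈ kids, t ∉ base := by
    intro t ht hmem
    have := List.of_mem_filter ((PySem.Set.mem_ofList _ t).mp ht)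
    rw [contains_true hmem] at this
    simp at this
  have hded : PySem.Set.ofList (base ++ kids) = PySem.Set.ofList base ++ kids :=
    ofList_append_disjoint base kids hknd hdisj
  -- B's v (= ofList (base ++ rawkids)) is exactly ofList base ++ kids
  have hv : PySem.Set.ofList (base ++ rawkids) = PySem.Set.ofList base ++ kids := by
    rw [PySem.Set.ofList_append, PySem.Set.update_eq_append_filter, hkids]
    congr 1
    refine List.filter_eq_self.mpr ?_
    intro y hy
    have hyk : y ∈ kids := hkids ▸ hy
    rw [PySem.Set.contains_eq_listContains,
      contains_false (fun h => hdisj y hyk ((PySem.Set.mem_ofList base y).mp h))]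
    rfl
  rw [hv]
  have hanyeq : (base ++ kids).any (fun s => PySem.Str.startswith s "subtab_")
      = (PySem.Set.ofList base ++ kids).any (fun s => PySem.Str.startswith s "subtab_") := by
    rw [← hded]
    exact (any_ofList _ _).symm
  by_cases hw : (base ++ kids) = []
  · have hb0 : base = [] := (List.append_eq_nil_iff.mp hw).1
    have hk0 : kids = [] := (List.append_eq_nil_iff.mp hw).2
    by_cases hs : k ∈ singlesOf all_ids
    · have hcond : k ∈ singlesOf all_ids ∧ base ++ kids = [] := ⟨hs, hw⟩
      rw [if_pos (c := k ∈ singlesOf all_ids ∧ base ++ kids = []) hcond]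
      have hmemf := List.of_mem_filter hs
      have hnsub : PySem.Str.startswith k "subtab_" = false := by
        simpa using hmemf
      have hany : ([k].any (fun s => PySem.Str.startswith s "subtab_")) = false := by
        simp only [List.any_cons, List.any_nil, hnsub, Bool.or_false]
      rw [hany]
      simp only [Bool.false_eq_true, if_false]
      have hdk : PySem.Set.ofList [k] = [k] :=
        PySem.Set.ofList_eq_self_of_nodup [k] (by simp)
      rw [hdk, hb0, hk0]
      have hnil : PySem.Set.ofList ([] : List String) = [] := rfl
      simp only [hnil, List.append_nil, List.any_nil, Bool.false_eq_true, if_false,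
        List.isEmpty_nil, Bool.true_and]
      rw [PySem.Set.contains_eq_listContains, contains_true ((PySem.Set.mem_ofList _ k).mpr hs)]
      simp
    · have hcond : ¬(k ∈ singlesOf all_ids ∧ base ++ kids = []) := fun h => hs h.1
      rw [if_neg (c := k ∈ singlesOf all_ids ∧ base ++ kids = []) hcond, hw, hb0, hk0]
      have hnil : PySem.Set.ofList ([] : List String) = [] := rfl
      simp only [hnil, List.append_nil, List.any_nil, Bool.false_eq_true, if_false,
        List.isEmpty_nil, Bool.true_and]
      rw [PySem.Set.contains_eq_listContains,
        contains_false (fun h => hs ((PySem.Set.mem_ofList _ k).mp h))]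
      simp
  · have hcond : ¬(k ∈ singlesOf all_ids ∧ base ++ kids = []) := fun h => hw h.2
    rw [if_neg (c := k ∈ singlesOf all_ids ∧ base ++ kids = []) hcond]
    by_cases ha : ((base ++ kids).any (fun s => PySem.Str.startswith s "subtab_")) = true
    · rw [if_pos (c := ((base ++ kids).any (fun s => PySem.Str.startswith s "subtab_")) = true) ha,
        if_pos (c := (((PySem.Set.ofList base ++ kids).any (fun s => PySem.Str.startswith s "subtab_"))) = true)
          (by rw [← hanyeq]; exact ha)]
      rw [ofList_filter, hded]
    · have ha' := eq_false_of_ne_true ha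
      rw [ha']
      simp only [Bool.false_eq_true, if_false]
      have hany2 : ((PySem.Set.ofList base ++ kids).any (fun s => PySem.Str.startswith s "subtab_")) = false := by
        rw [← hanyeq]; exact ha'
      rw [hany2]
      simp only [Bool.false_eq_true, if_false]
      have hne : (PySem.Set.ofList base ++ kids).isEmpty = false := by
        rcases h : (PySem.Set.ofList base ++ kids).isEmpty with _ | _
        · rfl
        · rw [← hded] at h
          exact absurd ((ofList_eq_nil_iff _).mp (List.isEmpty_iff.mp h)) hw
      rw [hne]
      simp only [Bool.false_and, Bool.false_eq_true, if_false]
      exact hded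

-- ===== VERDICT (by name: the statement is the Claim_ definition above) =====
theorem build_raw_to_group_spec : Claim_equal_build_raw_to_group := by
  intro all_ids raw2subs _
  show build_raw_to_group all_ids raw2subs = build_raw_to_group_alt all_ids raw2subs
  rw [buildA_pipeline, buildB_eq]
  have hnd2 : (dict2 all_ids raw2subs).keys.Nodup := nodup_keys_dict2 all_ids raw2subs
  have hnd3 : (dict3 all_ids raw2subs).keys.Nodup := by
    rw [keys_dict3]; exact hnd2
  have hkeys5 : ((dict3 all_ids raw2subs).keys.foldl body5 (dict3 all_ids raw2subs)).keys
      = (dict3 all_ids raw2subs).keys :=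
    keys_foldl_body5 _ _ (fun x hx => (PySem.Dict.contains_iff_mem_keys _ _).mpr hx)
  have hnd5 : ((dict3 all_ids raw2subs).keys.foldl body5 (dict3 all_ids raw2subs)).keys.Nodup := by
    rw [hkeys5]; exact hnd3
  rw [PySem.Dict.items_eq_map_keys _ hnd5 [], hkeys5, keys_dict3, keys_dict2]
  apply List.map_congr_left
  intro k hkm
  have hk2 : k ∈ (dict2 all_ids raw2subs).keys := by rw [keys_dict2]; exact hkm
  have hndK : (keyorderOf all_ids raw2subs).Nodup := keys_dict2 all_ids raw2subs ▸ hnd2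
  have hgd5 : ((keyorderOf all_ids raw2subs).foldl body5 (dict3 all_ids raw2subs)).getD k []
      = PySem.List.dedup ((dict3 all_ids raw2subs).getD k []) := by
    rw [getD_foldl_body5 _ _ _ hndK, if_pos hkm]
  rw [hgd5, final_value all_ids raw2subs k hk2]
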